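-- pv_equiv track=rewrite | github.com/mihirjham/PurdueCS | cs352/proj3-test2/harness.py | line_diff
-- ===== SOURCE A (Python) =====
-- CORRECT = 0
--
-- WHITESPACE = 1
--
-- ERROR = 2
--
-- def line_diff(a, b):
--     a = a.splitlines()
--     b = b.splitlines()
--     ws = False
--     if len(a) != len(b):
--         return ERROR
--
--     for i in range(len(a)):
--         if a[i] != b[i]:
--             if a[i].strip() == b[i].strip():
--                 ws = True
--             else:
--                 return ERROR
--
--     if ws:
--         return WHITESPACE
--     else:
--         return CORRECT
-- ===== SOURCE B (Python) =====
-- CORRECT = 0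
--
-- WHITESPACE = 1
--
-- ERROR = 2
--
-- def line_diff(a, b):
--     al = a.splitlines()
--     bl = b.splitlines()
--     if al == bl:
--         return CORRECT
--     if [l.strip() for l in al] == [l.strip() for l in bl]:
--         return WHITESPACE
--     return ERROR
-- ===== Notes on version B (the rewrite author's own statement) =====
-- stated objective: simpler
-- what changed: Replaced the index loop with its early return and mutable ws flag by two whole-list comparisons: raw line lists equal -> CORRECT, stripped line lists equal -> WHITESPACE, else ERROR (length mismatch falls out of stripped-list inequality).
import Mathlib
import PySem

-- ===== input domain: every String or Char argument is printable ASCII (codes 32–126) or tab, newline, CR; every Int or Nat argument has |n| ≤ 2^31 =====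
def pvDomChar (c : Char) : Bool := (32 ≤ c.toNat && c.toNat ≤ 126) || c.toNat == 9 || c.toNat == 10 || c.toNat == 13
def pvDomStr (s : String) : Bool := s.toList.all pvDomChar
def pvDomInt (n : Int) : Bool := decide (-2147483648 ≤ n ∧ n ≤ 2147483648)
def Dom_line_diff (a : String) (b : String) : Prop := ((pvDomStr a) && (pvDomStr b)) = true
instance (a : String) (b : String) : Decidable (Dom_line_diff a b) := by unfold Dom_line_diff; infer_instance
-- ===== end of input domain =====

-- B replaces A's early-return index loop with a mutable ws flag by two whole-list
-- comparisons (raw lists, then line-wise stripped lists); objective: simpler.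

-- ===== PORT A =====
-- the 'for i in range(len(a))' loop, run only when len a = len b, carrying the ws flag;
-- early 'return ERROR' becomes the 2 branch
def lineDiffLoop : List String → List String → Bool → Int
  | x :: xs, y :: ys, ws =>
      if x ≠ y then
        if PySem.Str.strip x = PySem.Str.strip y then lineDiffLoop xs ys true
        else 2
      else lineDiffLoop xs ys ws
  | _, _, ws => if ws then 1 else 0

def line_diff (a : String) (b : String) : Int :=
  let al := PySem.Str.splitlines a
  let bl := PySem.Str.splitlines b
  if al.length ≠ bl.length then 2
  else lineDiffLoop al bl false

-- ===== PORT B =====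
def line_diff_alt (a : String) (b : String) : Int :=
  let al := PySem.Str.splitlines a
  let bl := PySem.Str.splitlines b
  if al = bl then 0
  else if al.map PySem.Str.strip = bl.map PySem.Str.strip then 1
  else 2

-- ===== PRECONDITION & SPEC =====
def Spec_line_diff (a : String) (b : String) (out : Int) : Prop := out = line_diff_alt a b
instance (a : String) (b : String) (out : Int) : Decidable (Spec_line_diff a b out) := by unfold Spec_line_diff; infer_instance

-- ===== CLAIM (what is proved, stated in full; the proofs are below) =====
def Claim_equal_line_diff : Prop := ∀ (a : String) (b : String), Dom_line_diff a b → Spec_line_diff a b (line_diff a b)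

-- ===== LEMMAS AND PROOFS =====
theorem lineDiffLoop_eq (xs ys : List String) (ws : Bool) (h : xs.length = ys.length) :
    lineDiffLoop xs ys ws =
      if xs.map PySem.Str.strip ≠ ys.map PySem.Str.strip then 2
      else if xs = ys then (if ws then 1 else 0) else 1 := by
  induction xs generalizing ys ws with
  | nil =>
    cases ys with
    | nil => simp [lineDiffLoop]
    | cons y ys => simp at h
  | cons x xs ih =>
    cases ys with
    | nil => simp at h
    | cons y ys =>
      simp only [List.length_cons, Nat.add_right_cancel_iff] at h
      by_cases hxy : x = y
      · subst hxy
        simp only [lineDiffLoop, ne_eq, not_true_eq_false, if_false, ih ys ws h,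
          List.map_cons, List.cons.injEq, true_and]
      · by_cases hs : PySem.Str.strip x = PySem.Str.strip y
        · simp only [lineDiffLoop, ne_eq, not_false_eq_true, if_true, hs,
            ih ys true h, List.map_cons, List.cons.injEq, hxy, false_and, if_false]
          split_ifs with h1 h2 <;> simp_all
        · simp only [lineDiffLoop, ne_eq, hxy, not_false_eq_true, if_true, hs, if_false,
            List.map_cons, List.cons.injEq]
          split_ifs with h1 <;> simp_all

-- ===== VERDICT (by name: the statement is the Claim_ definition above) =====
theorem line_diff_spec : Claim_equal_line_diff := by
  intro a b _
  unfold Spec_line_diff line_diff line_diff_alt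
  set al := PySem.Str.splitlines a with hal
  set bl := PySem.Str.splitlines b with hbl
  by_cases hlen : al.length = bl.length
  · simp only [hlen, ne_eq, not_true_eq_false, if_false,
      lineDiffLoop_eq al bl false hlen]
    split_ifs with h1 h2 h3 <;> simp_all
  · have hmap : al.map PySem.Str.strip ≠ bl.map PySem.Str.strip := by
      intro h; apply hlen
      have := congrArg List.length h
      simpa using this
    have hne : al ≠ bl := by intro h; exact hlen (congrArg List.length h)
    simp [hlen, hmap, hne]
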